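-- pv_equiv track=rewrite | github.com/dertuncay/AFAD-Mass-Data-Downloader | sac_creator/utils.py | mag_seperator
-- ===== SOURCE A (Python) =====
-- def mag_type(val):
--   ''''imagtyp': I    Magnitude type:
--   * IMB (52): Bodywave Magnitude
--   * IMS (53): Surfacewave Magnitude
--   * IML (54): Local Magnitude
--   * IMW (55): Moment Magnitude
--   * IMD (56): Duration Magnitude
--   * IMX (57): User Defined Magnitude'''
--   val = val.lower()
--   if val == 'mb':
--     return 52
--   elif val == 'ms':
--     return 53
--   elif val == 'ml':
--     return 54
--   elif val == 'mw':
--     return 55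
--   elif val == 'md':
--     return 56
--   else:
--     return 0
--
-- def mag_seperator(val):
--   ''' Checks if multiple magnitude types are associated with the earthquake.
--   If so, following hierarchy is considered:
--   1. Mw
--   2. Ml
--   3. Ms
--   4. Md
--   5. Mb'''
--   val = val.lower()
--   mags = val.split(',')
--   mags = [w.replace('\r', '') for w in mags]
--   mags = [w.replace('\n', '') for w in mags]
--   magnitudes = []; mag_types = [];
--   for mag in mags:
--     if mag[0] == ' ':
--       mag = mag[1:]
--     mag,imagtyp = mag.split(' ')
--     magnitudes.append(mag)
--     mag_types.append(imagtyp)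
--   if 'mw' in mag_types:
--     idx = mag_types.index('mw')
--     return magnitudes[idx], mag_type(mag_types[idx])
--   elif 'ml' in mag_types:
--     idx = mag_types.index('ml')
--     return magnitudes[idx], mag_type(mag_types[idx])
--   elif 'ms' in mag_types:
--     idx = mag_types.index('ms')
--     return magnitudes[idx], mag_type(mag_types[idx])
--   elif 'md' in mag_types:
--     idx = mag_types.index('md')
--     return magnitudes[idx], mag_type(mag_types[idx])
--   elif 'mb' in mag_types:
--     idx = mag_types.index('mb')
--     return magnitudes[idx], mag_type(mag_types[idx])
--     return
-- ===== SOURCE B (Python) =====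
-- # Single-pass selection: rank each magnitude type and keep the best-ranked entry
-- # (first occurrence wins on equal rank), instead of a cascade of membership tests.
--
-- _RANK = {'mw': (1, 55), 'ml': (2, 54), 'ms': (3, 53), 'md': (4, 56), 'mb': (5, 52)}
--
-- def _parse_token(token):
--   token = token.replace('\r', '').replace('\n', '')
--   if token.startswith(' '):
--     token = token[1:]
--   mag, typ = token.split(' ')
--   return mag, typ
--
-- def mag_seperator(val):
--   best = None
--   for token in val.lower().split(','):
--     mag, typ = _parse_token(token)
--     info = _RANK.get(typ)
--     if info is not None and (best is None or info[0] < best[0]):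
--       best = (info[0], mag, info[1])
--   if best is not None:
--     return best[1], best[2]
-- ===== Notes on version B (the rewrite author's own statement) =====
-- stated objective: alternative
-- what changed: B replaces A's five-branch membership/index hierarchy cascade with a rank table and a single pass that keeps the best-ranked parsed entry (first occurrence wins on equal rank); Pre_ excludes exactly the inputs where A raises, namely a comma-separated token that is empty after newline removal or does not split into exactly a magnitude and a type.
import Mathlib
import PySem

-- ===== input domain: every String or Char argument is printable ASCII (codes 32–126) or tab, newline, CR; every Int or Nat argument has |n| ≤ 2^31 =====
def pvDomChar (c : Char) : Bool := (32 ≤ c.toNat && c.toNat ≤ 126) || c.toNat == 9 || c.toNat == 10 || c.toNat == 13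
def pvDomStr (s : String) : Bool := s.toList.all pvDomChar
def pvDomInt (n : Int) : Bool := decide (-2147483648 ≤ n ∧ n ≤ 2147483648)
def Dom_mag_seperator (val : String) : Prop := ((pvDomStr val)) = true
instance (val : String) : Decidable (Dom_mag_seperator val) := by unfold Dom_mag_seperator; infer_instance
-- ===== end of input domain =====

-- B replaces A's five-branch membership/index cascade by a single pass keeping the
-- best-ranked (mw<ml<ms<md<mb) parsed entry; objective: alternative algorithm, same cost.

-- ===== PORT A =====

-- port of helper mag_type
def mag_type (val : List Char) : Int :=
  let v := PySem.Chars.lower val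
  if v = ['m','b'] then 52
  else if v = ['m','s'] then 53
  else if v = ['m','l'] then 54
  else if v = ['m','w'] then 55
  else if v = ['m','d'] then 56
  else 0

-- one iteration of A's for-loop body: mag[0] test, strip one leading space,
-- 'mag,imagtyp = mag.split(' ')' (none exactly where Python raises IndexError/ValueError)
def stepA (mag : List Char) : Option (List Char × List Char) :=
  match PySem.Chars.pyGet? mag 0 with
  | none => none
  | some c =>
    let mag' := if c = ' ' then mag.drop 1 else mag   -- mag[1:] on a nonempty list = drop 1 (exact)
    match PySem.Chars.splitOn mag' [' '] with
    | [m, t] => some (m, t)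
    | _ => none

-- A's for-loop, appending to magnitudes / mag_types
def loopA : List (List Char) → List (List Char) → List (List Char) →
    Option (List (List Char) × List (List Char))
  | [], ms, ts => some (ms, ts)
  | mag :: rest, ms, ts =>
    match stepA mag with
    | none => none
    | some (m, t) => loopA rest (ms ++ [m]) (ts ++ [t])

-- A's five-branch hierarchy; ''x' in mag_types' followed by '.index(x)' is a match on index?
def cascadeA (magnitudes mag_types : List (List Char)) : Option (String × Int) :=
  match PySem.List.index? mag_types ['m','w'] with
  | some idx => some (String.ofList (magnitudes.getD idx []), mag_type (mag_types.getD idx []))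
  | none =>
  match PySem.List.index? mag_types ['m','l'] with
  | some idx => some (String.ofList (magnitudes.getD idx []), mag_type (mag_types.getD idx []))
  | none =>
  match PySem.List.index? mag_types ['m','s'] with
  | some idx => some (String.ofList (magnitudes.getD idx []), mag_type (mag_types.getD idx []))
  | none =>
  match PySem.List.index? mag_types ['m','d'] with
  | some idx => some (String.ofList (magnitudes.getD idx []), mag_type (mag_types.getD idx []))
  | none =>
  match PySem.List.index? mag_types ['m','b'] with
  | some idx => some (String.ofList (magnitudes.getD idx []), mag_type (mag_types.getD idx []))
  | none => none

def mag_seperator (val : String) : Option (String × Int) :=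
  let v := PySem.Chars.lower val.toList
  let mags0 := PySem.Chars.splitOn v [',']
  let mags1 := mags0.map (fun w => PySem.Chars.replace w ['\r'] [])
  let mags2 := mags1.map (fun w => PySem.Chars.replace w ['\n'] [])
  match loopA mags2 [] [] with
  | none => none
  | some (magnitudes, mag_types) => cascadeA magnitudes mag_types

-- ===== PORT B =====

-- port of B's _RANK dict
def RANK : PySem.Dict (List Char) (Nat × Int) :=
  PySem.Dict.ofList [(['m','w'],(1,55)), (['m','l'],(2,54)), (['m','s'],(3,53)),
                     (['m','d'],(4,56)), (['m','b'],(5,52))]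

-- port of B's _parse_token (none exactly where Python raises ValueError)
def parseToken (token : List Char) : Option (List Char × List Char) :=
  let t0 := PySem.Chars.replace (PySem.Chars.replace token ['\r'] []) ['\n'] []
  let t1 := if PySem.Chars.startswith t0 [' '] then t0.drop 1 else t0   -- token[1:] = drop 1 (exact)
  match PySem.Chars.splitOn t1 [' '] with
  | [m, t] => some (m, t)
  | _ => none

-- B's single pass keeping the best (lowest-rank, first wins) entry seen so far
def bestLoop : List (List Char) → Option (Nat × List Char × Int) →
    Option (Option (Nat × List Char × Int))
  | [], best => some best
  | token :: rest, best =>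
    match parseToken token with
    | none => none
    | some (m, t) =>
      match PySem.Dict.get? RANK t with
      | none => bestLoop rest best
      | some (r, code) =>
        match best with
        | none => bestLoop rest (some (r, m, code))
        | some (br, bm, bc) =>
          if r < br then bestLoop rest (some (r, m, code)) else bestLoop rest (some (br, bm, bc))

def mag_seperator_alt (val : String) : Option (String × Int) :=
  match bestLoop (PySem.Chars.splitOn (PySem.Chars.lower val.toList) [',']) none with
  | none => none
  | some none => none
  | some (some (_, m, code)) => some (String.ofList m, code)

-- ===== PRECONDITION & SPEC =====

-- Pre_ excludes exactly the inputs where A raises: a comma-separated token that is empty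
-- after newline/carriage-return removal (IndexError on its first character) or, after
-- stripping one leading space, does not contain exactly one space (ValueError unpacking).
def Pre_mag_seperator (val : String) : Prop :=
  ∀ w ∈ PySem.Chars.splitOn (PySem.Chars.lower val.toList) [','],
    PySem.Chars.replace (PySem.Chars.replace w ['\r'] []) ['\n'] [] ≠ [] ∧
    ((fun t => (if t.head? = some ' ' then t.drop 1 else t).count ' ' = 1)
      (PySem.Chars.replace (PySem.Chars.replace w ['\r'] []) ['\n'] []))
instance (val : String) : Decidable (Pre_mag_seperator val) := by
  unfold Pre_mag_seperator; infer_instance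

def pvWitness_mag_seperator : String := "4.0 Mb, 3.9 MW,3.5 ml"

def Spec_mag_seperator (val : String) (out : Option (String × Int)) : Prop :=
  out = mag_seperator_alt val
instance (val : String) (out : Option (String × Int)) : Decidable (Spec_mag_seperator val out) := by
  unfold Spec_mag_seperator; infer_instance

-- ===== CLAIM (what is proved, stated in full; the proofs are below) =====
def Claim_equal_mag_seperator : Prop :=
  ∀ (val : String), Dom_mag_seperator val → Pre_mag_seperator val →
    Spec_mag_seperator val (mag_seperator val)

-- ===== LEMMAS AND PROOFS =====

-- the two replaces, composed (shared by both ports' token preprocessing)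
def repl2 (w : List Char) : List Char :=
  PySem.Chars.replace (PySem.Chars.replace w ['\r'] []) ['\n'] []

-- parse every (already-replaced) token, as a list of (magnitude, type) pairs
def parsePairs : List (List Char) → Option (List (List Char × List Char))
  | [] => some []
  | t :: rest =>
    match stepA t with
    | none => none
    | some p => (parsePairs rest).map (p :: ·)

-- the ranked entry of a parsed pair, and the left-biased lower-rank merge
def entry (p : List Char × List Char) : Option (Nat × List Char × Int) :=
  match PySem.Dict.get? RANK p.2 with
  | none => none
  | some (r, c) => some (r, p.1, c)

def merge : Option (Nat × List Char × Int) → Option (Nat × List Char × Int) →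
    Option (Nat × List Char × Int)
  | none, b => b
  | some a, none => some a
  | some a, some b => if b.1 < a.1 then some b else some a

def rankOf : Option (Nat × List Char × Int) → Nat
  | none => 6
  | some e => e.1

def fin : Option (Nat × List Char × Int) → Option (String × Int)
  | none => none
  | some (_, m, c) => some (String.ofList m, c)


theorem stepB_eq (t : List Char) : parseToken t = stepA (repl2 t) := by
  unfold parseToken stepA repl2
  cases h : PySem.Chars.replace (PySem.Chars.replace t ['\r'] []) ['\n'] [] with
  | nil =>
    simp [PySem.Chars.pyGet?, PySem.List.pyGet?, PySem.List.pyIdx?, PySem.Chars.startswith,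
      show PySem.Chars.splitOn [] [' '] = [[]] from rfl]
  | cons c cs =>
    by_cases hc : c = ' '
    · simp [hc, PySem.Chars.pyGet?, PySem.List.pyGet?, PySem.List.pyIdx?, PySem.Chars.startswith]
    · simp [hc, Ne.symm hc, PySem.Chars.pyGet?, PySem.List.pyGet?, PySem.List.pyIdx?,
        PySem.Chars.startswith]

theorem loopA_eq : ∀ (toks ms ts : List (List Char)),
    loopA toks ms ts = (parsePairs toks).map
      (fun ps => (ms ++ ps.map Prod.fst, ts ++ ps.map Prod.snd))
  | [], ms, ts => by simp [loopA, parsePairs]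
  | t :: rest, ms, ts => by
    simp only [loopA, parsePairs]
    cases h : stepA t with
    | none => simp
    | some p =>
      obtain ⟨m, ty⟩ := p
      dsimp only
      rw [loopA_eq rest]
      cases parsePairs rest <;> simp

theorem rank_get (t : List Char) :
    PySem.Dict.get? RANK t =
      if ['m','w'] = t then some (1,55) else if ['m','l'] = t then some (2,54)
      else if ['m','s'] = t then some (3,53) else if ['m','d'] = t then some (4,56)
      else if ['m','b'] = t then some (5,52) else none := by
  have h : RANK = PySem.Dict.mk [(['m','w'],(1,55)), (['m','l'],(2,54)), (['m','s'],(3,53)),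
      (['m','d'],(4,56)), (['m','b'],(5,52))] := by rfl
  rw [h]
  simp only [PySem.Dict.get?, List.find?]
  by_cases h1 : ['m','w'] = t
  · subst h1; simp
  · rw [if_neg h1, show (['m','w'] == t) = false by simp [h1]]
    by_cases h2 : ['m','l'] = t
    · subst h2; simp
    · rw [if_neg h2, show (['m','l'] == t) = false by simp [h2]]
      by_cases h3 : ['m','s'] = t
      · subst h3; simp
      · rw [if_neg h3, show (['m','s'] == t) = false by simp [h3]]
        by_cases h4 : ['m','d'] = t
        · subst h4; simp
        · rw [if_neg h4, show (['m','d'] == t) = false by simp [h4]]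
          by_cases h5 : ['m','b'] = t
          · subst h5; simp
          · rw [if_neg h5, show (['m','b'] == t) = false by simp [h5]]
            rfl

-- the rank of a type token (6 = unranked)
def trank (t : List Char) : Nat :=
  match PySem.Dict.get? RANK t with
  | none => 6
  | some (r, _) => r

theorem trank_pos (t : List Char) : 1 ≤ trank t := by
  unfold trank; rw [rank_get]; split_ifs <;> simp

theorem trank_le_one_iff (t : List Char) : trank t ≤ 1 ↔ t = ['m','w'] := by
  unfold trank; rw [rank_get]; split_ifs <;> simp_all [eq_comm]

theorem trank_le_two_iff (t : List Char) : trank t ≤ 2 ↔ t = ['m','w'] ∨ t = ['m','l'] := by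
  unfold trank; rw [rank_get]; split_ifs <;> simp_all [eq_comm]

theorem trank_le_three_iff (t : List Char) :
    trank t ≤ 3 ↔ t = ['m','w'] ∨ t = ['m','l'] ∨ t = ['m','s'] := by
  unfold trank; rw [rank_get]; split_ifs <;> simp_all [eq_comm]

theorem trank_le_four_iff (t : List Char) :
    trank t ≤ 4 ↔ t = ['m','w'] ∨ t = ['m','l'] ∨ t = ['m','s'] ∨ t = ['m','d'] := by
  unfold trank; rw [rank_get]; split_ifs <;> simp_all [eq_comm]

theorem rankOf_entry (p : List Char × List Char) : rankOf (entry p) = trank p.2 := by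
  unfold entry trank rankOf
  cases PySem.Dict.get? RANK p.2 with
  | none => rfl
  | some rc => cases rc; rfl

theorem trank_le_six (t : List Char) : trank t ≤ 6 := by
  unfold trank; rw [rank_get]; split_ifs <;> simp

theorem rankOf_entry_le_six (p : List Char × List Char) : rankOf (entry p) ≤ 6 := by
  rw [rankOf_entry]; exact trank_le_six p.2

theorem rankOf_merge_le_right (a b : Option (Nat × List Char × Int)) (ha : rankOf a ≤ 6) :
    rankOf (merge a b) ≤ rankOf b := by
  cases a with
  | none => simp [merge]
  | some x =>
    cases b with
    | none => simpa [merge, rankOf] using ha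
    | some y =>
      simp only [rankOf] at ha ⊢
      simp only [merge]
      split_ifs with h
      · exact le_rfl
      · show x.1 ≤ y.1; omega

theorem merge_assoc (a b c : Option (Nat × List Char × Int)) :
    merge (merge a b) c = merge a (merge b c) := by
  cases a with
  | none => rfl
  | some x =>
    cases b with
    | none => rfl
    | some y =>
      cases c with
      | none =>
        show merge (if y.1 < x.1 then some y else some x) none = _
        split_ifs <;> simp only [merge] <;> split_ifs <;> rfl
      | some z =>
        show merge (if y.1 < x.1 then some y else some x) (some z) =
          merge (some x) (if z.1 < y.1 then some z else some y)
        split_ifs <;> simp only [merge] <;> split_ifs <;> first | rfl | omega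

theorem foldl_merge (l : List (Option (Nat × List Char × Int)))
    (b : Option (Nat × List Char × Int)) :
    List.foldl merge b l = merge b (List.foldl merge none l) := by
  induction l generalizing b with
  | nil => cases b <;> rfl
  | cons x l ih =>
    simp only [List.foldl_cons]
    rw [ih (merge b x)]
    conv_rhs => rw [show merge none x = x from rfl, ih x]
    rw [merge_assoc]

-- the best-ranked entry of a parsed list (first occurrence wins on ties)
def selB (ps : List (List Char × List Char)) : Option (Nat × List Char × Int) :=
  List.foldl merge none (ps.map entry)

theorem selB_cons (p : List Char × List Char) (ps : List (List Char × List Char)) :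
    selB (p :: ps) = merge (entry p) (selB ps) := by
  simp only [selB, List.map_cons, List.foldl_cons]
  rw [foldl_merge]
  rfl

theorem bestLoop_eq : ∀ (toks : List (List Char)) (b : Option (Nat × List Char × Int)),
    bestLoop toks b = (parsePairs (toks.map repl2)).map
      (fun ps => List.foldl merge b (ps.map entry))
  | [], b => by simp [bestLoop, parsePairs]
  | tok :: rest, b => by
    simp only [bestLoop, List.map_cons, parsePairs, stepB_eq tok]
    cases h : stepA (repl2 tok) with
    | none => simp
    | some p =>
      obtain ⟨m, ty⟩ := p
      dsimp only
      have he : entry (m, ty) =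
          match PySem.Dict.get? RANK ty with
          | none => none
          | some (r, c) => some (r, m, c) := rfl
      cases hr : PySem.Dict.get? RANK ty with
      | none =>
        dsimp only
        rw [bestLoop_eq rest b]
        cases parsePairs (rest.map repl2) <;> simp [he, hr, merge]
        · cases b <;> rfl
      | some rc =>
        obtain ⟨r, c⟩ := rc
        cases b with
        | none =>
          dsimp only
          rw [bestLoop_eq rest (some (r, m, c))]
          cases parsePairs (rest.map repl2) <;> simp [he, hr, merge]
        | some be =>
          obtain ⟨br, bm, bc⟩ := be
          dsimp only
          by_cases hlt : r < br
          · rw [if_pos hlt, bestLoop_eq rest (some (r, m, c))]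
            cases parsePairs (rest.map repl2) <;> simp [he, hr, merge, hlt]
          · rw [if_neg hlt, bestLoop_eq rest (some (br, bm, bc))]
            cases parsePairs (rest.map repl2) <;> simp [he, hr, merge, hlt]

theorem selB_rank_le_iff (ps : List (List Char × List Char)) (k : Nat) (hk : k ≤ 5) :
    rankOf (selB ps) ≤ k ↔ ∃ p ∈ ps, trank p.2 ≤ k := by
  induction ps with
  | nil => simp [selB, rankOf]; omega
  | cons p ps ih =>
    rw [selB_cons]
    constructor
    · intro h
      cases he : entry p with
      | none =>
        rw [he] at h; simp only [merge] at h
        obtain ⟨q, hq, hq2⟩ := ih.mp h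
        exact ⟨q, List.mem_cons_of_mem _ hq, hq2⟩
      | some e =>
        rw [he] at h
        cases hs : selB ps with
        | none =>
          rw [hs] at h; simp only [merge, rankOf] at h
          refine ⟨p, List.mem_cons_self, ?_⟩
          rw [← rankOf_entry, he]; exact h
        | some s =>
          rw [hs] at h; simp only [merge] at h
          split_ifs at h with hcmp
          · have : rankOf (selB ps) ≤ k := by rw [hs]; exact h
            obtain ⟨q, hq, hq2⟩ := ih.mp this
            exact ⟨q, List.mem_cons_of_mem _ hq, hq2⟩
          · refine ⟨p, List.mem_cons_self, ?_⟩
            rw [← rankOf_entry, he]; exact h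
    · rintro ⟨q, hq, hq2⟩
      rcases List.mem_cons.mp hq with rfl | hq'
      · have h1 : rankOf (entry q) ≤ k := by rw [rankOf_entry]; exact hq2
        cases he : entry q with
        | none => rw [he] at h1; simp [rankOf] at h1; omega
        | some e =>
          rw [he] at h1
          cases hs : selB ps with
          | none => simpa [merge, rankOf] using h1
          | some s =>
            simp only [merge]
            split_ifs with hcmp
            · simp only [rankOf] at h1 ⊢; omega
            · exact h1
      · have h1 : rankOf (selB ps) ≤ k := ih.mpr ⟨q, hq', hq2⟩
        calc rankOf (merge (entry p) (selB ps))
            ≤ rankOf (selB ps) := rankOf_merge_le_right (entry p) (selB ps) (rankOf_entry_le_six p)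
          _ ≤ k := h1

theorem merge_eq_right {r : Nat} {x : List Char} {y : Int} (b : Option (Nat × List Char × Int))
    (hr : r ≤ 6) (h : rankOf b < r) : merge (some (r, x, y)) b = b := by
  cases b with
  | none => simp [rankOf] at h; omega
  | some e => simp only [rankOf] at h; simp only [merge]; rw [if_pos h]

theorem merge_eq_left {r : Nat} {x : List Char} {y : Int} (b : Option (Nat × List Char × Int))
    (h : r ≤ rankOf b) : merge (some (r, x, y)) b = some (r, x, y) := by
  cases b with
  | none => rfl
  | some e =>
    simp only [rankOf] at h
    simp only [merge]
    rw [if_neg (by omega)]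

theorem rank_found (ps : List (List Char × List Char)) (y : List Char) {i : Nat} (k : Nat)
    (hk : k ≤ 5) (hy : PySem.List.index? (ps.map Prod.snd) y = some i) (ht : trank y ≤ k) :
    rankOf (selB ps) ≤ k := by
  have hmem : y ∈ ps.map Prod.snd := by
    rw [← PySem.List.index?_isSome_iff, hy]; rfl
  obtain ⟨q, hq, rfl⟩ := List.mem_map.mp hmem
  exact (selB_rank_le_iff ps k hk).mpr ⟨q, hq, ht⟩

theorem selB_rank_pos (ps : List (List Char × List Char)) : 1 ≤ rankOf (selB ps) := by
  by_contra h
  obtain ⟨q, _, hq⟩ := (selB_rank_le_iff ps 0 (by omega)).mp (by omega)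
  have := trank_pos q.2
  omega

-- shift lemmas: a ranked type found in the tail makes the head column irrelevant
theorem cascade_shift_mw {m t : List Char} {ms ts : List (List Char)} {i : Nat}
    (h1 : t ≠ ['m','w']) (hmw : PySem.List.index? ts ['m','w'] = some i) :
    cascadeA (m :: ms) (t :: ts) = cascadeA ms ts := by
  unfold cascadeA
  rw [PySem.List.index?_cons_of_ne _ h1, hmw]
  simp

theorem cascade_shift_ml {m t : List Char} {ms ts : List (List Char)} {i : Nat}
    (h1 : t ≠ ['m','w']) (h2 : t ≠ ['m','l'])
    (hmw : PySem.List.index? ts ['m','w'] = none)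
    (hml : PySem.List.index? ts ['m','l'] = some i) :
    cascadeA (m :: ms) (t :: ts) = cascadeA ms ts := by
  unfold cascadeA
  rw [PySem.List.index?_cons_of_ne _ h1, hmw, PySem.List.index?_cons_of_ne _ h2, hml]
  simp

theorem cascade_shift_ms {m t : List Char} {ms ts : List (List Char)} {i : Nat}
    (h1 : t ≠ ['m','w']) (h2 : t ≠ ['m','l']) (h3 : t ≠ ['m','s'])
    (hmw : PySem.List.index? ts ['m','w'] = none)
    (hml : PySem.List.index? ts ['m','l'] = none)
    (hms : PySem.List.index? ts ['m','s'] = some i) :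
    cascadeA (m :: ms) (t :: ts) = cascadeA ms ts := by
  unfold cascadeA
  rw [PySem.List.index?_cons_of_ne _ h1, hmw, PySem.List.index?_cons_of_ne _ h2, hml,
    PySem.List.index?_cons_of_ne _ h3, hms]
  simp

theorem cascade_shift_md {m t : List Char} {ms ts : List (List Char)} {i : Nat}
    (h1 : t ≠ ['m','w']) (h2 : t ≠ ['m','l']) (h3 : t ≠ ['m','s']) (h4 : t ≠ ['m','d'])
    (hmw : PySem.List.index? ts ['m','w'] = none)
    (hml : PySem.List.index? ts ['m','l'] = none)
    (hms : PySem.List.index? ts ['m','s'] = none)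
    (hmd : PySem.List.index? ts ['m','d'] = some i) :
    cascadeA (m :: ms) (t :: ts) = cascadeA ms ts := by
  unfold cascadeA
  rw [PySem.List.index?_cons_of_ne _ h1, hmw, PySem.List.index?_cons_of_ne _ h2, hml,
    PySem.List.index?_cons_of_ne _ h3, hms, PySem.List.index?_cons_of_ne _ h4, hmd]
  simp

-- head-wins lemmas
theorem cascade_head_mw {m : List Char} {ms ts : List (List Char)} :
    cascadeA (m :: ms) (['m','w'] :: ts) = some (String.ofList m, 55) := by
  unfold cascadeA
  rw [PySem.List.index?_cons_self]
  simp [show mag_type ['m','w'] = 55 from by decide]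

theorem cascade_head_ml {m : List Char} {ms ts : List (List Char)}
    (hmw : PySem.List.index? ts ['m','w'] = none) :
    cascadeA (m :: ms) (['m','l'] :: ts) = some (String.ofList m, 54) := by
  unfold cascadeA
  rw [PySem.List.index?_cons_of_ne _ (by decide), hmw, PySem.List.index?_cons_self]
  simp [show mag_type ['m','l'] = 54 from by decide]

theorem cascade_head_ms {m : List Char} {ms ts : List (List Char)}
    (hmw : PySem.List.index? ts ['m','w'] = none)
    (hml : PySem.List.index? ts ['m','l'] = none) :
    cascadeA (m :: ms) (['m','s'] :: ts) = some (String.ofList m, 53) := by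
  unfold cascadeA
  rw [PySem.List.index?_cons_of_ne _ (by decide), hmw, PySem.List.index?_cons_of_ne _ (by decide),
    hml, PySem.List.index?_cons_self]
  simp [show mag_type ['m','s'] = 53 from by decide]

theorem cascade_head_md {m : List Char} {ms ts : List (List Char)}
    (hmw : PySem.List.index? ts ['m','w'] = none)
    (hml : PySem.List.index? ts ['m','l'] = none)
    (hms : PySem.List.index? ts ['m','s'] = none) :
    cascadeA (m :: ms) (['m','d'] :: ts) = some (String.ofList m, 56) := by
  unfold cascadeA
  rw [PySem.List.index?_cons_of_ne _ (by decide), hmw, PySem.List.index?_cons_of_ne _ (by decide),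
    hml, PySem.List.index?_cons_of_ne _ (by decide), hms, PySem.List.index?_cons_self]
  simp [show mag_type ['m','d'] = 56 from by decide]

theorem cascade_head_mb {m : List Char} {ms ts : List (List Char)}
    (hmw : PySem.List.index? ts ['m','w'] = none)
    (hml : PySem.List.index? ts ['m','l'] = none)
    (hms : PySem.List.index? ts ['m','s'] = none)
    (hmd : PySem.List.index? ts ['m','d'] = none) :
    cascadeA (m :: ms) (['m','b'] :: ts) = some (String.ofList m, 52) := by
  unfold cascadeA
  rw [PySem.List.index?_cons_of_ne _ (by decide), hmw, PySem.List.index?_cons_of_ne _ (by decide),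
    hml, PySem.List.index?_cons_of_ne _ (by decide), hms, PySem.List.index?_cons_of_ne _ (by decide),
    hmd, PySem.List.index?_cons_self]
  simp [show mag_type ['m','b'] = 52 from by decide]

-- absence of the better-ranked types bounds selB's rank from below
theorem rank_notle_one (ps : List (List Char × List Char))
    (hmw : PySem.List.index? (ps.map Prod.snd) ['m','w'] = none) :
    ¬ rankOf (selB ps) ≤ 1 := by
  intro h
  obtain ⟨q, hq, hq1⟩ := (selB_rank_le_iff ps 1 (by omega)).mp h
  rw [trank_le_one_iff] at hq1
  exact (PySem.List.index?_eq_none_iff _ _).mp hmw (hq1 ▸ List.mem_map_of_mem hq)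

theorem rank_notle_two (ps : List (List Char × List Char))
    (hmw : PySem.List.index? (ps.map Prod.snd) ['m','w'] = none)
    (hml : PySem.List.index? (ps.map Prod.snd) ['m','l'] = none) :
    ¬ rankOf (selB ps) ≤ 2 := by
  intro h
  obtain ⟨q, hq, hq1⟩ := (selB_rank_le_iff ps 2 (by omega)).mp h
  rw [trank_le_two_iff] at hq1
  rcases hq1 with h' | h'
  · exact (PySem.List.index?_eq_none_iff _ _).mp hmw (h' ▸ List.mem_map_of_mem hq)
  · exact (PySem.List.index?_eq_none_iff _ _).mp hml (h' ▸ List.mem_map_of_mem hq)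

theorem rank_notle_three (ps : List (List Char × List Char))
    (hmw : PySem.List.index? (ps.map Prod.snd) ['m','w'] = none)
    (hml : PySem.List.index? (ps.map Prod.snd) ['m','l'] = none)
    (hms : PySem.List.index? (ps.map Prod.snd) ['m','s'] = none) :
    ¬ rankOf (selB ps) ≤ 3 := by
  intro h
  obtain ⟨q, hq, hq1⟩ := (selB_rank_le_iff ps 3 (by omega)).mp h
  rw [trank_le_three_iff] at hq1
  rcases hq1 with h' | h' | h'
  · exact (PySem.List.index?_eq_none_iff _ _).mp hmw (h' ▸ List.mem_map_of_mem hq)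
  · exact (PySem.List.index?_eq_none_iff _ _).mp hml (h' ▸ List.mem_map_of_mem hq)
  · exact (PySem.List.index?_eq_none_iff _ _).mp hms (h' ▸ List.mem_map_of_mem hq)

theorem rank_notle_four (ps : List (List Char × List Char))
    (hmw : PySem.List.index? (ps.map Prod.snd) ['m','w'] = none)
    (hml : PySem.List.index? (ps.map Prod.snd) ['m','l'] = none)
    (hms : PySem.List.index? (ps.map Prod.snd) ['m','s'] = none)
    (hmd : PySem.List.index? (ps.map Prod.snd) ['m','d'] = none) :
    ¬ rankOf (selB ps) ≤ 4 := by
  intro h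
  obtain ⟨q, hq, hq1⟩ := (selB_rank_le_iff ps 4 (by omega)).mp h
  rw [trank_le_four_iff] at hq1
  rcases hq1 with h' | h' | h' | h'
  · exact (PySem.List.index?_eq_none_iff _ _).mp hmw (h' ▸ List.mem_map_of_mem hq)
  · exact (PySem.List.index?_eq_none_iff _ _).mp hml (h' ▸ List.mem_map_of_mem hq)
  · exact (PySem.List.index?_eq_none_iff _ _).mp hms (h' ▸ List.mem_map_of_mem hq)
  · exact (PySem.List.index?_eq_none_iff _ _).mp hmd (h' ▸ List.mem_map_of_mem hq)

theorem trank_mw : trank ['m','w'] = 1 := by decide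
theorem trank_ml : trank ['m','l'] = 2 := by decide
theorem trank_ms : trank ['m','s'] = 3 := by decide
theorem trank_md : trank ['m','d'] = 4 := by decide

-- A's hierarchy cascade computes exactly B's best-ranked entry
theorem cascade_selB : ∀ (ps : List (List Char × List Char)),
    cascadeA (ps.map Prod.fst) (ps.map Prod.snd) = fin (selB ps)
  | [] => by decide
  | (m, t) :: ps => by
    have ih := cascade_selB ps
    rw [List.map_cons, List.map_cons, selB_cons]
    dsimp only
    rcases hr : PySem.Dict.get? RANK t with _ | ⟨r, c⟩
    · have he : entry (m, t) = none := by simp [entry, hr]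
      rw [he, show merge none (selB ps) = selB ps from rfl, ← ih]
      rw [rank_get] at hr
      split_ifs at hr with a1 a2 a3 a4 a5; try simp at hr
      cases hmw : PySem.List.index? (ps.map Prod.snd) ['m','w'] with
      | some i => exact cascade_shift_mw (fun e => a1 e.symm) hmw
      | none =>
      cases hml : PySem.List.index? (ps.map Prod.snd) ['m','l'] with
      | some i => exact cascade_shift_ml (fun e => a1 e.symm) (fun e => a2 e.symm) hmw hml
      | none =>
      cases hms : PySem.List.index? (ps.map Prod.snd) ['m','s'] with
      | some i =>
          exact cascade_shift_ms (fun e => a1 e.symm) (fun e => a2 e.symm) (fun e => a3 e.symm) hmw hml hms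
      | none =>
      cases hmd : PySem.List.index? (ps.map Prod.snd) ['m','d'] with
      | some i =>
          exact cascade_shift_md (fun e => a1 e.symm) (fun e => a2 e.symm) (fun e => a3 e.symm) (fun e => a4 e.symm) hmw hml hms hmd
      | none =>
      -- head unranked, tail decides (or nothing ranked at all): unfold the mb column
      unfold cascadeA
      rw [PySem.List.index?_cons_of_ne _ (fun e => a1 e.symm), hmw,
        PySem.List.index?_cons_of_ne _ (fun e => a2 e.symm), hml,
        PySem.List.index?_cons_of_ne _ (fun e => a3 e.symm), hms,
        PySem.List.index?_cons_of_ne _ (fun e => a4 e.symm), hmd,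
        PySem.List.index?_cons_of_ne _ (fun e => a5 e.symm)]
      cases hmb : PySem.List.index? (ps.map Prod.snd) ['m','b'] <;> simp
    · have he : entry (m, t) = some (r, m, c) := by simp [entry, hr]
      rw [he]
      rw [rank_get] at hr
      split_ifs at hr with a1 a2 a3 a4 a5 <;> simp at hr
      · -- t = mw
        obtain ⟨rfl, rfl⟩ := hr
        subst a1
        rw [cascade_head_mw, merge_eq_left _ (selB_rank_pos ps)]
        rfl
      · -- t = ml
        obtain ⟨rfl, rfl⟩ := hr
        subst a2
        cases hmw : PySem.List.index? (ps.map Prod.snd) ['m','w'] with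
        | some i =>
          rw [cascade_shift_mw (by decide) hmw, ih, merge_eq_right _ (by omega)
            (by have h := rank_found ps ['m','w'] 1 (by omega) hmw (by rw [trank_mw]); omega)]
        | none =>
          rw [cascade_head_ml hmw,
            merge_eq_left _ (by have h := rank_notle_one ps hmw; omega)]
          rfl
      · -- t = ms
        obtain ⟨rfl, rfl⟩ := hr
        subst a3
        cases hmw : PySem.List.index? (ps.map Prod.snd) ['m','w'] with
        | some i =>
          rw [cascade_shift_mw (by decide) hmw, ih, merge_eq_right _ (by omega)
            (by have h := rank_found ps ['m','w'] 1 (by omega) hmw (by rw [trank_mw]); omega)]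
        | none =>
        cases hml : PySem.List.index? (ps.map Prod.snd) ['m','l'] with
        | some i =>
          rw [cascade_shift_ml (by decide) (by decide) hmw hml, ih, merge_eq_right _ (by omega)
            (by have h := rank_found ps ['m','l'] 2 (by omega) hml (by rw [trank_ml]); omega)]
        | none =>
          rw [cascade_head_ms hmw hml,
            merge_eq_left _ (by have h := rank_notle_two ps hmw hml; omega)]
          rfl
      · -- t = md
        obtain ⟨rfl, rfl⟩ := hr
        subst a4
        cases hmw : PySem.List.index? (ps.map Prod.snd) ['m','w'] with
        | some i =>
          rw [cascade_shift_mw (by decide) hmw, ih, merge_eq_right _ (by omega)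
            (by have h := rank_found ps ['m','w'] 1 (by omega) hmw (by rw [trank_mw]); omega)]
        | none =>
        cases hml : PySem.List.index? (ps.map Prod.snd) ['m','l'] with
        | some i =>
          rw [cascade_shift_ml (by decide) (by decide) hmw hml, ih, merge_eq_right _ (by omega)
            (by have h := rank_found ps ['m','l'] 2 (by omega) hml (by rw [trank_ml]); omega)]
        | none =>
        cases hms : PySem.List.index? (ps.map Prod.snd) ['m','s'] with
        | some i =>
          rw [cascade_shift_ms (by decide) (by decide) (by decide) hmw hml hms, ih,
            merge_eq_right _ (by omega)
            (by have h := rank_found ps ['m','s'] 3 (by omega) hms (by rw [trank_ms]); omega)]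
        | none =>
          rw [cascade_head_md hmw hml hms,
            merge_eq_left _ (by have h := rank_notle_three ps hmw hml hms; omega)]
          rfl
      · -- t = mb
        obtain ⟨rfl, rfl⟩ := hr
        subst a5
        cases hmw : PySem.List.index? (ps.map Prod.snd) ['m','w'] with
        | some i =>
          rw [cascade_shift_mw (by decide) hmw, ih, merge_eq_right _ (by omega)
            (by have h := rank_found ps ['m','w'] 1 (by omega) hmw (by rw [trank_mw]); omega)]
        | none =>
        cases hml : PySem.List.index? (ps.map Prod.snd) ['m','l'] with
        | some i =>
          rw [cascade_shift_ml (by decide) (by decide) hmw hml, ih, merge_eq_right _ (by omega)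
            (by have h := rank_found ps ['m','l'] 2 (by omega) hml (by rw [trank_ml]); omega)]
        | none =>
        cases hms : PySem.List.index? (ps.map Prod.snd) ['m','s'] with
        | some i =>
          rw [cascade_shift_ms (by decide) (by decide) (by decide) hmw hml hms, ih,
            merge_eq_right _ (by omega)
            (by have h := rank_found ps ['m','s'] 3 (by omega) hms (by rw [trank_ms]); omega)]
        | none =>
        cases hmd : PySem.List.index? (ps.map Prod.snd) ['m','d'] with
        | some i =>
          rw [cascade_shift_md (by decide) (by decide) (by decide) (by decide) hmw hml hms hmd,
            ih, merge_eq_right _ (by omega)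
            (by have h := rank_found ps ['m','d'] 4 (by omega) hmd (by rw [trank_md]); omega)]
        | none =>
          rw [cascade_head_mb hmw hml hms hmd,
            merge_eq_left _ (by have h := rank_notle_four ps hmw hml hms hmd; omega)]
          rfl

-- ===== VERDICT (by name: the statement is the Claim_ definition above) =====
theorem mag_seperator_spec : Claim_equal_mag_seperator := by
  intro val hdom hpre
  simp only [Spec_mag_seperator, mag_seperator, mag_seperator_alt]
  rw [bestLoop_eq]
  have hm : ((PySem.Chars.splitOn (PySem.Chars.lower val.toList) [',']).map
      (fun w => PySem.Chars.replace w ['\r'] [])).map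
      (fun w => PySem.Chars.replace w ['\n'] []) =
      (PySem.Chars.splitOn (PySem.Chars.lower val.toList) [',']).map repl2 := by
    rw [List.map_map]; rfl
  rw [hm, loopA_eq]
  cases hps : parsePairs ((PySem.Chars.splitOn (PySem.Chars.lower val.toList) [',']).map repl2) with
  | none => rfl
  | some ps =>
    dsimp only [Option.map]
    simp only [List.nil_append]
    rw [cascade_selB ps]
    rw [show List.foldl merge none (List.map entry ps) = selB ps from rfl]
    cases hs : selB ps with
    | none => rfl
    | some e => obtain ⟨r, mm, c⟩ := e; rfl
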